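-- pv_equiv track=rewrite | github.com/nocode-ecosdeliderazgo/Agente-Ventas-Brenda-Whatsapp | app/application/usecases/diagnostic_tools_use_case.py | _create_tool_implementation_timeline
-- ===== SOURCE A (Python) =====
-- from typing import Dict, List, Optional, Tuple
--
-- def _create_tool_implementation_timeline(recommended_tools: List[Dict]) -> Dict:
--     """Crea timeline de implementación de herramientas"""
--
--     timeline = {"month_1": [], "month_2": [], "month_3": [], "month_4": []}
--
--     # Distribuir herramientas por prioridad
--     high_priority = [tool for tool in recommended_tools if tool.get("priority") == "high"]
--     medium_priority = [tool for tool in recommended_tools if tool.get("priority") == "medium"]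
--
--     # Asignar por meses
--     for i, tool in enumerate(high_priority[:2]):
--         timeline[f"month_{i+1}"].append(tool)
--
--     for i, tool in enumerate(medium_priority[:2]):
--         month_key = f"month_{i+3}"
--         if month_key in timeline:
--             timeline[month_key].append(tool)
--
--     return timeline
-- ===== SOURCE B (Python) =====
-- def _create_tool_implementation_timeline(recommended_tools):
--     """Crea timeline de implementación de herramientas"""
--     m1, m2, m3, m4 = [], [], [], []
--     high_count = 0
--     medium_count = 0
--     for tool in recommended_tools:
--         priority = tool.get("priority")
--         if priority == "high" and high_count < 2:
--             (m1 if high_count == 0 else m2).append(tool)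
--             high_count += 1
--         elif priority == "medium" and medium_count < 2:
--             (m3 if medium_count == 0 else m4).append(tool)
--             medium_count += 1
--     return {"month_1": m1, "month_2": m2, "month_3": m3, "month_4": m4}
-- ===== Notes on version B (the rewrite author's own statement) =====
-- stated objective: alternative
-- what changed: Replaced A's two filter comprehensions plus two enumerate-assignment loops into the dict with a single pass over recommended_tools maintaining high/medium counters and four explicit month lists assembled into the dict at the end.
import Mathlib
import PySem

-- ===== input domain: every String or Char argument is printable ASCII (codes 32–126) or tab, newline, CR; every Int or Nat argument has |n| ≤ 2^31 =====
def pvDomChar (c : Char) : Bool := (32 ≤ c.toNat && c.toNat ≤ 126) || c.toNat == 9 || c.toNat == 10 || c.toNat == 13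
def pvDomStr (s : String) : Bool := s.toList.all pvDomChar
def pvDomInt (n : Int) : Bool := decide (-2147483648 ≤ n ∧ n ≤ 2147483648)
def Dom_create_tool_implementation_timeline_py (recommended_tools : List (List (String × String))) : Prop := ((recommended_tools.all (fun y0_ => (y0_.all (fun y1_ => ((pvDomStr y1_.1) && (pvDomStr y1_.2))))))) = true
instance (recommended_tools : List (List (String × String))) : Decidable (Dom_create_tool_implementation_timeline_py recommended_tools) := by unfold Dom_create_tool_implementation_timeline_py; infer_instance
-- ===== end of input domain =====

-- B merges A's two filter passes and two assignment loops into one traversal with two counters; alternative decomposition, same return value.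

-- ===== PORT A =====
def create_tool_implementation_timeline_py (recommended_tools : List (List (String × String))) : List (String × List (List (String × String))) :=
  let timeline : PySem.Dict String (List (List (String × String))) :=
    PySem.Dict.mk [("month_1", []), ("month_2", []), ("month_3", []), ("month_4", [])]
  let high_priority := recommended_tools.filter (fun tool => (PySem.Dict.mk tool).get? "priority" == some "high")
  let medium_priority := recommended_tools.filter (fun tool => (PySem.Dict.mk tool).get? "priority" == some "medium")
  let timeline := (PySem.List.enumerate (PySem.List.slice high_priority none (some 2))).foldl
      (fun tl p => PySem.Dict.modify tl ("month_" ++ PySem.Int.toStr (p.1 + 1)) [] (fun l => l ++ [p.2])) timeline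
  let timeline := (PySem.List.enumerate (PySem.List.slice medium_priority none (some 2))).foldl
      (fun tl p =>
        let month_key := "month_" ++ PySem.Int.toStr (p.1 + 3)
        if PySem.Dict.contains tl month_key then PySem.Dict.modify tl month_key [] (fun l => l ++ [p.2]) else tl) timeline
  timeline.items

-- ===== PORT B =====
def tlLoop (xs : List (List (String × String))) (high_count medium_count : Nat)
    (m1 m2 m3 m4 : List (List (String × String))) : List (String × List (List (String × String))) :=
  match xs with
  | [] => [("month_1", m1), ("month_2", m2), ("month_3", m3), ("month_4", m4)]
  | tool :: rest =>
    let priority := (PySem.Dict.mk tool).get? "priority"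
    if priority == some "high" && decide (high_count < 2) then
      if high_count == 0 then tlLoop rest (high_count + 1) medium_count (m1 ++ [tool]) m2 m3 m4
      else tlLoop rest (high_count + 1) medium_count m1 (m2 ++ [tool]) m3 m4
    else if priority == some "medium" && decide (medium_count < 2) then
      if medium_count == 0 then tlLoop rest high_count (medium_count + 1) m1 m2 (m3 ++ [tool]) m4
      else tlLoop rest high_count (medium_count + 1) m1 m2 m3 (m4 ++ [tool])
    else tlLoop rest high_count medium_count m1 m2 m3 m4

def create_tool_implementation_timeline_py_alt (recommended_tools : List (List (String × String))) : List (String × List (List (String × String))) :=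
  tlLoop recommended_tools 0 0 [] [] [] []

-- ===== PRECONDITION & SPEC =====
def Spec_create_tool_implementation_timeline_py (recommended_tools : List (List (String × String))) (out : List (String × List (List (String × String)))) : Prop := out = create_tool_implementation_timeline_py_alt recommended_tools
instance (recommended_tools : List (List (String × String))) (out : List (String × List (List (String × String)))) : Decidable (Spec_create_tool_implementation_timeline_py recommended_tools out) := by unfold Spec_create_tool_implementation_timeline_py; infer_instance

-- ===== CLAIM (what is proved, stated in full; the proofs are below) =====
def Claim_equal_create_tool_implementation_timeline_py : Prop := ∀ (recommended_tools : List (List (String × String))), Dom_create_tool_implementation_timeline_py recommended_tools → Spec_create_tool_implementation_timeline_py recommended_tools (create_tool_implementation_timeline_py recommended_tools)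

-- ===== LEMMAS AND PROOFS =====

-- first-slot contribution of a priority class when the counter is already c
def slot1 (c : Nat) (l : List (List (String × String))) : List (List (String × String)) :=
  if c = 0 then l.take 1 else []
-- second-slot contribution of a priority class when the counter is already c
def slot2 (c : Nat) (l : List (List (String × String))) : List (List (String × String)) :=
  if c = 0 then (l.drop 1).take 1 else if c = 1 then l.take 1 else []

def isHigh (tool : List (String × String)) : Bool := (PySem.Dict.mk tool).get? "priority" == some "high"
def isMed (tool : List (String × String)) : Bool := (PySem.Dict.mk tool).get? "priority" == some "medium"

theorem slot1_nil (c : Nat) : slot1 c [] = [] := by unfold slot1; split <;> rfl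
theorem slot2_nil (c : Nat) : slot2 c [] = [] := by unfold slot2; split <;> [rfl; (split <;> rfl)]

theorem tlLoop_spec (xs : List (List (String × String))) :
    ∀ (hc mc : Nat) (m1 m2 m3 m4 : List (List (String × String))),
    tlLoop xs hc mc m1 m2 m3 m4 =
      [("month_1", m1 ++ slot1 hc (xs.filter isHigh)),
       ("month_2", m2 ++ slot2 hc (xs.filter isHigh)),
       ("month_3", m3 ++ slot1 mc (xs.filter isMed)),
       ("month_4", m4 ++ slot2 mc (xs.filter isMed))] := by
  induction xs with
  | nil => intro hc mc m1 m2 m3 m4; simp [tlLoop, slot1_nil, slot2_nil]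
  | cons t rest ih =>
    intro hc mc m1 m2 m3 m4
    by_cases hH : isHigh t = true
    · have hp : (PySem.Dict.mk t).get? "priority" = some "high" := by
        simpa [isHigh] using hH
      have hMf : isMed t = false := by simp [isMed, hp]
      rcases Nat.lt_or_ge hc 2 with h2 | h2
      · interval_cases hc
        · simp only [tlLoop, hp]
          simp only [List.filter_cons, hH, hMf]
          simp [ih, slot1, slot2]
        · simp only [tlLoop, hp]
          simp only [List.filter_cons, hH, hMf]
          simp [ih, slot1, slot2]
      · have hd : decide (hc < 2) = false := by simp; omega
        have h0 : hc ≠ 0 := by omega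
        have h1 : hc ≠ 1 := by omega
        simp only [tlLoop, hp, hd]
        simp only [List.filter_cons, hH, hMf]
        simp [ih, slot1, slot2, h0, h1]
    · have hpne : ((PySem.Dict.mk t).get? "priority" == some "high") = false := by
        simpa [isHigh] using hH
      have hHf : isHigh t = false := by simpa using hH
      by_cases hM : isMed t = true
      · have hm : (PySem.Dict.mk t).get? "priority" = some "medium" := by
          simpa [isMed] using hM
        rcases Nat.lt_or_ge mc 2 with h2 | h2
        · interval_cases mc
          · simp only [tlLoop, hm]
            simp only [List.filter_cons, hHf, hM]
            simp [ih, slot1, slot2]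
          · simp only [tlLoop, hm]
            simp only [List.filter_cons, hHf, hM]
            simp [ih, slot1, slot2]
        · have hd : decide (mc < 2) = false := by simp; omega
          have h0 : mc ≠ 0 := by omega
          have h1 : mc ≠ 1 := by omega
          simp only [tlLoop, hm, hd]
          simp only [List.filter_cons, hHf, hM]
          simp [ih, slot1, slot2, h0, h1]
      · have hmne : ((PySem.Dict.mk t).get? "priority" == some "medium") = false := by
          simpa [isMed] using hM
        have hMf : isMed t = false := by simpa using hM
        simp only [tlLoop, hpne, hmne]
        simp only [List.filter_cons, hHf, hMf]
        simp [ih]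

theorem slice_two (l : List (List (String × String))) :
    PySem.List.slice l none (some 2) = l.take 2 := by
  simpa using PySem.List.slice_to_natCast (xs := l) (b := 2)

theorem portA_spec (xs : List (List (String × String))) :
    create_tool_implementation_timeline_py xs =
      [("month_1", (xs.filter isHigh).take 1),
       ("month_2", ((xs.filter isHigh).drop 1).take 1),
       ("month_3", (xs.filter isMed).take 1),
       ("month_4", ((xs.filter isMed).drop 1).take 1)] := by
  unfold create_tool_implementation_timeline_py
  simp only [slice_two]
  have hH : xs.filter (fun tool => (PySem.Dict.mk tool).get? "priority" == some "high") = xs.filter isHigh := rfl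
  have hM : xs.filter (fun tool => (PySem.Dict.mk tool).get? "priority" == some "medium") = xs.filter isMed := rfl
  rw [hH, hM]
  generalize xs.filter isHigh = hf
  generalize xs.filter isMed = mf
  rcases hf with _ | ⟨a, _ | ⟨b, hrest⟩⟩ <;> rcases mf with _ | ⟨c, _ | ⟨d, mrest⟩⟩ <;>
  · have K1 : "month_" ++ PySem.Int.toStr ((0:Int) + 1) = "month_1" := by decide
    have K2 : "month_" ++ PySem.Int.toStr ((1:Int) + 1) = "month_2" := by decide
    have K3 : "month_" ++ PySem.Int.toStr ((0:Int) + 3) = "month_3" := by decide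
    have K4 : "month_" ++ PySem.Int.toStr ((1:Int) + 3) = "month_4" := by decide
    simp only [List.take_succ_cons, List.take_nil, PySem.List.enumerate_cons,
      PySem.List.enumerate_nil, List.foldl_cons, List.foldl_nil, K1, K2, K3, K4]
    rfl

-- ===== VERDICT (by name: the statement is the Claim_ definition above) =====
theorem create_tool_implementation_timeline_py_spec : Claim_equal_create_tool_implementation_timeline_py := by
  intro xs _
  unfold Spec_create_tool_implementation_timeline_py create_tool_implementation_timeline_py_alt
  rw [portA_spec, tlLoop_spec]
  simp [slot1, slot2]
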